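-- pv_equiv track=rewrite | github.com/KimJinung/problem_solving | Algorithm/Programmers/1/대충 만든 자판.py | calcul_character_weight
-- ===== SOURCE A (Python) =====
-- from collections import defaultdict
--
-- def calcul_character_weight(keymap: list) -> dict:
--     weight_dict = defaultdict(int)
--
--     for button in keymap:
--         for idx, ch in enumerate(button):
--             idx += 1
--
--             if weight_dict[ch] == 0:
--                 weight_dict[ch] = idx
--             elif weight_dict[ch] > idx:
--                 weight_dict[ch] = idx
--
--     return weight_dict
-- ===== SOURCE B (Python) =====
-- from collections import defaultdict
--
-- def calcul_character_weight(keymap: list) -> dict: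
--     # collect every (1-based) position of each character, then reduce each group to its minimum
--     groups = defaultdict(list)
--     for button in keymap:
--         for idx, ch in enumerate(button, 1):
--             groups[ch].append(idx)
--
--     weight_dict = defaultdict(int)
--     for ch, positions in groups.items():
--         weight_dict[ch] = min(positions)
--
--     return weight_dict
-- ===== Notes on version B (the rewrite author's own statement) =====
-- stated objective: alternative
-- what changed: A maintains a running minimum per character in one dict with compare-and-overwrite branches; B first groups all 1-based positions of each character into lists in one pass, then a second pass reduces each group to its minimum.
import Mathlib
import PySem

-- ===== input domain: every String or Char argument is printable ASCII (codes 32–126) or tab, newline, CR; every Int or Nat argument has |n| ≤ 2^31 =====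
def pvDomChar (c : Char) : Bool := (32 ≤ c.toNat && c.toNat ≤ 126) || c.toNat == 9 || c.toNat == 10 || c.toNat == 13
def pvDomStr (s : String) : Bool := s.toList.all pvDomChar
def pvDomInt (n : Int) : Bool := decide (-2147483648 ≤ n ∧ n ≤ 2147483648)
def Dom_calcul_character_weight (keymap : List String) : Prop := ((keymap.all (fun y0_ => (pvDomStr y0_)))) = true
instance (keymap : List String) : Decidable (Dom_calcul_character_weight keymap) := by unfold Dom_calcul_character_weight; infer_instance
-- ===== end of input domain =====

-- B replaces A's running-minimum dict with a collect-positions-then-reduce two-pass decomposition (objective: alternative).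

-- ===== PORT A =====
def calcul_character_weight (keymap : List String) : List (String × Int) :=
  (keymap.foldl (fun d button =>
      (PySem.List.enumerate button.toList 0).foldl (fun d p =>
        let idx := p.1 + 1
        let ch := String.singleton p.2
        if d.getD ch 0 = 0 then d.insert ch idx
        else if d.getD ch 0 > idx then d.insert ch idx
        else d) d)
    (PySem.Dict.empty)).items

-- ===== PORT B =====
def calcul_character_weight_alt (keymap : List String) : List (String × Int) :=
  let groups : PySem.Dict String (List Int) :=
    keymap.foldl (fun g button =>
      (PySem.List.enumerate button.toList 1).foldl (fun g p =>
        g.modify (String.singleton p.2) [] (· ++ [p.1])) g)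
      PySem.Dict.empty
  -- min(positions): every group is nonempty, so minD's default 0 is never consulted
  let result : PySem.Dict String Int :=
    groups.items.foldl (fun r q => r.insert q.1 (PySem.List.minD q.2 (fun x => x) 0)) PySem.Dict.empty
  result.items

-- ===== PRECONDITION & SPEC =====
def Spec_calcul_character_weight (keymap : List String) (out : List (String × Int)) : Prop := out = calcul_character_weight_alt keymap
instance (keymap : List String) (out : List (String × Int)) : Decidable (Spec_calcul_character_weight keymap out) := by unfold Spec_calcul_character_weight; infer_instance

-- ===== CLAIM (what is proved, stated in full; the proofs are below) =====
def Claim_equal_calcul_character_weight : Prop := ∀ (keymap : List String), Dom_calcul_character_weight keymap → Spec_calcul_character_weight keymap (calcul_character_weight keymap)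

-- ===== LEMMAS AND PROOFS =====

-- min over a nonempty Int list, as B computes it
def pvMin (l : List Int) : Option Int := PySem.List.min? l (fun x => x)

-- A's per-character step
def pvStepA (d : PySem.Dict String Int) (ch : String) (idx : Int) : PySem.Dict String Int :=
  if d.getD ch 0 = 0 then d.insert ch idx
  else if d.getD ch 0 > idx then d.insert ch idx
  else d

-- the invariant tying A's running-minimum dict to B's groups dict
def pvInv (d : PySem.Dict String Int) (g : PySem.Dict String (List Int)) : Prop :=
  d.items = g.items.map (fun p => (p.1, (pvMin p.2).getD 0)) ∧
  g.keys.Nodup ∧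
  ∀ p ∈ g.items, p.2 ≠ [] ∧ ∀ i ∈ p.2, 1 ≤ i

lemma pvMin_append (l : List Int) (i : Int) :
    pvMin (l ++ [i]) = match pvMin l with
      | none => some i
      | some m => if i < m then some i else some m := by
  cases hx : pvMin l with
  | none =>
    rw [pvMin, PySem.List.min?] at hx ⊢
    rw [List.foldl_append, hx]
    rfl
  | some m =>
    rw [pvMin, PySem.List.min?] at hx ⊢
    rw [List.foldl_append, hx]
    rfl

lemma pvMin_mem {l : List Int} {m : Int} (h : pvMin l = some m) : m ∈ l := by
  induction l using List.reverseRecOn generalizing m with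
  | nil => simp [pvMin, PySem.List.min?] at h
  | append_singleton xs x ih =>
    rw [pvMin_append] at h
    cases hx : pvMin xs with
    | none => rw [hx] at h; simp_all
    | some m' =>
      rw [hx] at h
      by_cases hlt : x < m'
      · simp [hlt] at h; simp [h.symm]
      · simp [hlt] at h; exact List.mem_append_left _ (ih (h ▸ hx))

lemma pvMin_isSome {l : List Int} (h : l ≠ []) : (pvMin l).isSome := by
  induction l using List.reverseRecOn with
  | nil => simp at h
  | append_singleton xs x ih =>
    rw [pvMin_append]
    cases hx : pvMin xs with
    | none => simp
    | some m => by_cases hlt : x < m <;> simp [hlt]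

-- with nodup keys, the item at a key is unique
lemma pv_item_unique {ν : Type} {g : PySem.Dict String ν} (hnd : g.keys.Nodup)
    {ch : String} {l : ν} (hmem : (ch, l) ∈ g.items) :
    ∀ q ∈ g.items, q.1 = ch → q = (ch, l) := by
  intro q hq hq1
  exact List.inj_on_of_nodup_map hnd hq hmem hq1

lemma pv_keys_eq (d : PySem.Dict String Int) (g : PySem.Dict String (List Int))
    (h : pvInv d g) : d.keys = g.keys := by
  rw [PySem.Dict.keys, PySem.Dict.keys, h.1, List.map_map]
  rfl

lemma pvInv_step (d : PySem.Dict String Int) (g : PySem.Dict String (List Int))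
    (ch : String) (idx : Int) (hidx : 1 ≤ idx) (h : pvInv d g) :
    pvInv (pvStepA d ch idx) (g.modify ch [] (· ++ [idx])) := by
  obtain ⟨hitems, hnd, hpos⟩ := h
  have hkeys : d.keys = g.keys := pv_keys_eq d g ⟨hitems, hnd, hpos⟩
  have hdc : ∀ k, d.contains k = g.contains k := by
    intro k
    rw [PySem.Dict.contains_eq_decide_mem_keys, PySem.Dict.contains_eq_decide_mem_keys, hkeys]
  rw [PySem.Dict.modify]
  by_cases hc : g.contains ch = true
  · -- ch already grouped: A holds the (nonzero) running minimum of its list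
    have hchk : ch ∈ g.keys := (PySem.Dict.contains_iff_mem_keys g ch).1 hc
    obtain ⟨q, hqmem, hq1⟩ := List.mem_map.1 hchk
    obtain ⟨l, hl⟩ : ∃ l, (ch, l) ∈ g.items := ⟨q.2, by rwa [show (ch, q.2) = q by rw [← hq1]]⟩
    have hgD : g.getD ch [] = l := PySem.Dict.getD_of_mem_items g hl hnd []
    obtain ⟨hlne, hlpos⟩ := hpos (ch, l) hl
    obtain ⟨v, hv⟩ := Option.isSome_iff_exists.1 (pvMin_isSome hlne)
    have hv1 : 1 ≤ v := hlpos v (pvMin_mem hv)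
    have hdmem : (ch, v) ∈ d.items := by
      rw [hitems]
      exact List.mem_map.2 ⟨(ch, l), hl, by simp [hv]⟩
    have hdnd : d.keys.Nodup := hkeys ▸ hnd
    have hdD : d.getD ch 0 = v := PySem.Dict.getD_of_mem_items d hdmem hdnd 0
    have hmin : pvMin (l ++ [idx]) = if idx < v then some idx else some v := by
      rw [pvMin_append, hv]
    have hnewD : ((pvMin (l ++ [idx])).getD 0) = if idx < v then idx else v := by
      rw [hmin]; split <;> rfl
    have hgitems : (g.insert ch (g.getD ch [] ++ [idx])).items =
        g.items.map (fun p => if (p.1 == ch) = true then (ch, l ++ [idx]) else p) := by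
      rw [PySem.Dict.items_insert_of_contains g _ hc, hgD]
    have hrepl : ∀ p ∈ g.items, (p.1 == ch) = true → p = (ch, l) := by
      intro p hp hpe
      exact pv_item_unique hnd hl p hp (by simpa using hpe)
    refine ⟨?_, ?_, ?_⟩
    · -- items equality
      rw [hgitems, List.map_map]
      unfold pvStepA
      rw [hdD]
      have hvne : ¬ v = 0 := by omega
      by_cases hgt : v > idx
      · simp only [if_neg hvne, if_pos hgt]
        rw [PySem.Dict.items_insert_of_contains d idx (by rw [hdc]; exact hc), hitems, List.map_map]
        refine List.map_congr_left ?_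
        intro p hp
        by_cases hpe : (p.1 == ch) = true
        · have := hrepl p hp hpe
          subst this
          simp [hnewD, if_pos (by omega : idx < v)]
        · simp only [Function.comp]
          simp [hpe]
      · simp only [if_neg hvne, if_neg hgt]
        rw [hitems]
        refine List.map_congr_left ?_
        intro p hp
        by_cases hpe : (p.1 == ch) = true
        · have := hrepl p hp hpe
          subst this
          simp [hnewD, if_neg (by omega : ¬ idx < v), hv]
        · simp only [Function.comp]
          simp [hpe]
    · rw [PySem.Dict.keys_insert_of_contains g _ hc]; exact hnd
    · intro p hp
      rcases (PySem.Dict.mem_items_insert g ch _ p).1 hp with hpe | ⟨hpm, _⟩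
      · subst hpe
        refine ⟨by simp, ?_⟩
        intro i hi
        rw [hgD] at hi
        rcases List.mem_append.1 hi with hi | hi
        · exact hlpos i hi
        · simp at hi; omega
      · exact hpos p hpm
  · -- fresh character: both sides append a new entry
    have hc' : g.contains ch = false := by simpa using hc
    have hdc' : d.contains ch = false := by rw [hdc]; exact hc'
    have hgD : g.getD ch [] = [] := PySem.Dict.getD_of_not_contains g [] hc'
    have hdD : d.getD ch 0 = 0 := PySem.Dict.getD_of_not_contains d 0 hdc'
    unfold pvStepA
    rw [hdD, if_pos rfl, hgD]
    refine ⟨?_, ?_, ?_⟩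
    · rw [PySem.Dict.items_insert_of_not_contains d idx hdc',
        PySem.Dict.items_insert_of_not_contains g _ hc', List.map_append, hitems]
      rfl
    · rw [PySem.Dict.keys_insert_of_not_contains g _ hc']
      have hch : ch ∉ g.keys := by
        intro hm
        rw [← PySem.Dict.contains_iff_mem_keys] at hm
        rw [hm] at hc'
        cases hc'
      simp only [List.nodup_append, List.nodup_singleton, true_and]
      refine ⟨hnd, ?_⟩
      intro a ha b hb
      rcases List.mem_singleton.1 hb with rfl
      exact fun hab => hch (hab ▸ ha)
    · intro p hp
      rcases (PySem.Dict.mem_items_insert g ch _ p).1 hp with hpe | ⟨hpm, _⟩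
      · subst hpe
        exact ⟨by simp, by intro i hi; simp at hi; omega⟩
      · exact hpos p hpm

lemma pvInv_foldl (pairs : List (Int × Char)) (d : PySem.Dict String Int)
    (g : PySem.Dict String (List Int)) (hpairs : ∀ p ∈ pairs, 1 ≤ p.1) (h : pvInv d g) :
    pvInv (pairs.foldl (fun d p => pvStepA d (String.singleton p.2) p.1) d)
          (pairs.foldl (fun g p => g.modify (String.singleton p.2) [] (· ++ [p.1])) g) := by
  induction pairs generalizing d g with
  | nil => exact h
  | cons p ps ih =>
    exact ih _ _ (fun q hq => hpairs q (List.mem_cons_of_mem _ hq))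
      (pvInv_step d g _ p.1 (hpairs p (List.mem_cons_self ..)) h)

lemma pv_enumerate_shift {α : Type} (xs : List α) (s : Int) :
    (PySem.List.enumerate xs s).map (fun p => (p.1 + 1, p.2)) = PySem.List.enumerate xs (s + 1) := by
  induction xs generalizing s with
  | nil => simp [PySem.List.enumerate_nil]
  | cons x xs ih => simp [PySem.List.enumerate_cons, ih]

lemma pv_enumerate_fst_le {α : Type} (xs : List α) (s : Int) :
    ∀ p ∈ PySem.List.enumerate xs s, s ≤ p.1 := by
  induction xs generalizing s with
  | nil => simp [PySem.List.enumerate_nil]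
  | cons x xs ih =>
    intro p hp
    rw [PySem.List.enumerate_cons] at hp
    rcases List.mem_cons.1 hp with h | h
    · simp [h]
    · have := ih (s + 1) p h; omega

lemma pvInv_keymap (keymap : List String) (d : PySem.Dict String Int)
    (g : PySem.Dict String (List Int)) (h : pvInv d g) :
    pvInv
      (keymap.foldl (fun d button =>
        (PySem.List.enumerate button.toList 1).foldl
          (fun d p => pvStepA d (String.singleton p.2) p.1) d) d)
      (keymap.foldl (fun g button =>
        (PySem.List.enumerate button.toList 1).foldl
          (fun g p => g.modify (String.singleton p.2) [] (· ++ [p.1])) g) g) := by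
  induction keymap generalizing d g with
  | nil => exact h
  | cons b bs ih =>
    exact ih _ _ (pvInv_foldl _ _ _ (fun p hp => pv_enumerate_fst_le b.toList 1 p hp) h)

-- A's inner loop (0-based enumerate, idx += 1) is the pvStepA fold over the 1-based enumerate
lemma pvA_inner (button : String) (d : PySem.Dict String Int) :
    (PySem.List.enumerate button.toList 0).foldl (fun d p =>
        let idx := p.1 + 1
        let ch := String.singleton p.2
        if d.getD ch 0 = 0 then d.insert ch idx
        else if d.getD ch 0 > idx then d.insert ch idx
        else d) d =
    (PySem.List.enumerate button.toList 1).foldl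
      (fun d p => pvStepA d (String.singleton p.2) p.1) d := by
  rw [show (1 : Int) = 0 + 1 by rfl, ← pv_enumerate_shift, List.foldl_map]
  rfl

-- ===== VERDICT (by name: the statement is the Claim_ definition above) =====
theorem calcul_character_weight_spec : Claim_equal_calcul_character_weight := by
  intro keymap _
  unfold Spec_calcul_character_weight calcul_character_weight calcul_character_weight_alt
  have hinit : pvInv (PySem.Dict.empty) (PySem.Dict.empty) := by
    refine ⟨rfl, List.nodup_nil, by intro p hp; simp [PySem.Dict.empty] at hp⟩
  have hinv := pvInv_keymap keymap PySem.Dict.empty PySem.Dict.empty hinit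
  obtain ⟨hitems, hnd, _⟩ := hinv
  rw [PySem.Dict.keys] at hnd
  simp only [pvA_inner]
  rw [hitems]
  rw [PySem.Dict.items_foldl_insert_fresh _ (fun q : String × List Int => q.1)
    (fun q => PySem.List.minD q.2 (fun x => x) 0) PySem.Dict.empty
    (fun a _ => PySem.Dict.contains_empty a.1) hnd]
  rfl
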